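-- pv_equiv track=rewrite | github.com/BlazeKing13/tcs-ng | .github/scripts/content_from_issue.py | parse_issue_form
-- ===== SOURCE A (Python) =====
-- def parse_issue_form(body: str):
--     result = {}
--     current_key = None
--     current_value = []
--
--     for line in body.splitlines():
--         if line.startswith("### "):
--             if current_key is not None:
--                 result[current_key] = "\n".join(current_value).strip()
--             current_key = line[4:].strip()
--             current_value = []
--         else:
--             current_value.append(line)
--
--     if current_key is not None:
--         result[current_key] = "\n".join(current_value).strip()
--
--     return result
-- ===== SOURCE B (Python) =====
-- def _groups(lines):
--     pairs = []
--     i, n = 0, len(lines)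
--     while i < n:
--         if lines[i].startswith("### "):
--             j = i + 1
--             while j < n and not lines[j].startswith("### "):
--                 j += 1
--             pairs.append((lines[i][4:].strip(), "\n".join(lines[i + 1:j]).strip()))
--             i = j
--         else:
--             i += 1
--     return pairs
--
--
-- def parse_issue_form(body: str):
--     return dict(_groups(body.splitlines()))
-- ===== Notes on version B (the rewrite author's own statement) =====
-- stated objective: alternative
-- what changed: Replaces A's single stateful accumulator loop (pending key + value buffer flushed at each header and at the end) with a two-phase decomposition: a recursive grouper that splits the line list at headers into ordered (key, value) pairs, then one dict() construction.
import Mathlib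
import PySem

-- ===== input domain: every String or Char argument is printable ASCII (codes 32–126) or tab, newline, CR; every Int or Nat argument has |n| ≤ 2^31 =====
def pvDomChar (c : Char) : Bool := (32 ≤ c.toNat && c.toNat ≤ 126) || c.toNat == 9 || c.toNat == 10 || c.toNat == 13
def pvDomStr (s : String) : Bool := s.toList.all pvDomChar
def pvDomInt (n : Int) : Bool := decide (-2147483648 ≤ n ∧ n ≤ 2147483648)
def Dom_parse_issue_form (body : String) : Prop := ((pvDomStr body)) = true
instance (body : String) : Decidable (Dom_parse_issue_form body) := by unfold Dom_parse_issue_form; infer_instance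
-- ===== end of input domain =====

-- B parses the form in two phases — a structural recursion that extracts the ordered
-- (key, value) pairs, then one dict() build — instead of A's single accumulator loop
-- carrying a pending key/value state (objective: alternative decomposition).


-- ===== PORT A =====
-- A's loop state: (result dict, current_key, current_value)
def pvStepA (s : PySem.Dict String String × Option String × List String) (line : String) :
    PySem.Dict String String × Option String × List String :=
  if PySem.Str.startswith line "### " then
    let d := match s.2.1 with
      | some k => s.1.insert k (PySem.Str.strip (PySem.Str.join "\n" s.2.2))
      | none => s.1
    (d, some (PySem.Str.strip (PySem.Str.slice line (some 4) none)), [])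
  else
    (s.1, s.2.1, s.2.2 ++ [line])

-- A's trailing 'if current_key is not None: result[current_key] = ...'
def pvFinishA (st : PySem.Dict String String × Option String × List String) :
    PySem.Dict String String :=
  match st.2.1 with
  | some k => st.1.insert k (PySem.Str.strip (PySem.Str.join "\n" st.2.2))
  | none => st.1

def parse_issue_form (body : String) : List (String × String) :=
  (pvFinishA ((PySem.Str.splitlines body).foldl pvStepA (PySem.Dict.empty, none, []))).items

-- ===== PORT B =====
-- _groups as recursion on the suffix lines[i:]: the outer while-loop step is one
-- match arm; the inner scan j..  and the slice lines[i+1:j] are, on the suffix,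
-- takeWhile / dropWhile of the non-header predicate (exact correspondence).
def pvGroups : List String → List (String × String)
  | [] => []
  | head :: rest =>
    if PySem.Str.startswith head "### " then
      let vals := rest.takeWhile (fun l => !PySem.Str.startswith l "### ")
      let rest' := rest.dropWhile (fun l => !PySem.Str.startswith l "### ")
      (PySem.Str.strip (PySem.Str.slice head (some 4) none),
        PySem.Str.strip (PySem.Str.join "\n" vals)) :: pvGroups rest'
    else
      pvGroups rest
  termination_by lines => lines.length
  decreasing_by
  · simpa using Nat.lt_succ_of_le (List.length_dropWhile_le _ _)
  · simp

def parse_issue_form_alt (body : String) : List (String × String) :=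
  (PySem.Dict.ofList (pvGroups (PySem.Str.splitlines body))).items

-- ===== PRECONDITION & SPEC =====
def Spec_parse_issue_form (body : String) (out : List (String × String)) : Prop := out = parse_issue_form_alt body
instance (body : String) (out : List (String × String)) : Decidable (Spec_parse_issue_form body out) := by unfold Spec_parse_issue_form; infer_instance

-- ===== CLAIM (what is proved, stated in full; the proofs are below) =====
def Claim_equal_parse_issue_form : Prop := ∀ (body : String), Dom_parse_issue_form body → Spec_parse_issue_form body (parse_issue_form body)

-- ===== LEMMAS AND PROOFS =====

def pvIns (d : PySem.Dict String String) (ps : List (String × String)) :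
    PySem.Dict String String :=
  ps.foldl (fun acc p => acc.insert p.1 p.2) d

theorem pvFoldA_some (ls : List String) : ∀ (d : PySem.Dict String String) (k : String)
    (acc : List String),
    pvFinishA (ls.foldl pvStepA (d, some k, acc)) =
      pvIns (d.insert k (PySem.Str.strip (PySem.Str.join "\n"
          (acc ++ ls.takeWhile (fun l => !PySem.Str.startswith l "### ")))))
        (pvGroups (ls.dropWhile (fun l => !PySem.Str.startswith l "### "))) := by
  induction ls with
  | nil => intro d k acc; simp [pvFinishA, pvGroups, pvIns]
  | cons l ls ih =>
    intro d k acc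
    by_cases h : PySem.Str.startswith l "### "
    · simp only [List.foldl_cons, pvStepA, h, List.takeWhile_cons,
        List.dropWhile_cons, Bool.not_true, Bool.false_eq_true, if_false, if_true]
      rw [ih]
      simp at h
      simp [pvGroups, h, pvIns]
    · simp only [List.foldl_cons, pvStepA, h, Bool.false_eq_true, if_false,
        List.takeWhile_cons, List.dropWhile_cons, Bool.not_false, if_true]
      rw [ih]
      simp

theorem pvFoldA_none (ls : List String) : ∀ (d : PySem.Dict String String)
    (acc : List String),
    pvFinishA (ls.foldl pvStepA (d, none, acc)) = pvIns d (pvGroups ls) := by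
  induction ls with
  | nil => intro d acc; simp [pvFinishA, pvGroups, pvIns]
  | cons l ls ih =>
    intro d acc
    by_cases h : PySem.Str.startswith l "### "
    · simp only [List.foldl_cons, pvStepA, h, if_true]
      rw [pvFoldA_some]
      simp at h
      simp [pvGroups, h, pvIns]
    · simp only [List.foldl_cons, pvStepA, h, Bool.false_eq_true, if_false]
      rw [ih d (acc ++ [l])]
      simp at h
      simp [pvGroups, h]

-- ===== VERDICT (by name: the statement is the Claim_ definition above) =====
theorem parse_issue_form_spec : Claim_equal_parse_issue_form := by
  intro body _
  show parse_issue_form body = parse_issue_form_alt body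
  unfold parse_issue_form parse_issue_form_alt
  rw [pvFoldA_none]
  rfl
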